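-- pv_equiv track=rewrite | github.com/Mequam/decraft | main.py | decraft
-- ===== SOURCE A (Python) =====
-- def add_dictionary_vectors(d1,d2):
-- 	for i in d1:
-- 		if i in d2:
-- 			d2[i] += d1[i]
-- 		else:
-- 			d2[i] = d1[i]
-- 	return d2
--
-- def scale_dictionary_vectors(scalar,vector):
-- 	for val in vector:
-- 		vector[val] *= scalar
--
-- def decraft(craft_dictionary,item):
-- 	if item[1] in craft_dictionary:
-- 		ret_val = {}
-- 		for thing in craft_dictionary[item[1]]:
-- 			add_dictionary_vectors(
-- 				decraft(craft_dictionary,thing),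
-- 				ret_val
-- 			)
-- 		scale_dictionary_vectors(item[0],ret_val)
-- 		return ret_val
-- 	else:
--
-- 		return {item[1]:item[0]}
-- ===== SOURCE B (Python) =====
-- def decraft(craft_dictionary, item):
--     counts = {}
--
--     def walk(count, name):
--         if name in craft_dictionary:
--             for c, n in craft_dictionary[name]:
--                 walk(count * c, n)
--         else:
--             counts[name] = counts.get(name, 0) + count
--
--     walk(item[0], item[1])
--     return counts
-- ===== Notes on version B (the rewrite author's own statement) =====
-- stated objective: alternative
-- what changed: B threads one accumulator dict through the recursion with the multiplier pushed down (count*c at each edge, one counter update per leaf), instead of A's building, merging and re-scaling an intermediate dict at every recursion node.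
import Mathlib
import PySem

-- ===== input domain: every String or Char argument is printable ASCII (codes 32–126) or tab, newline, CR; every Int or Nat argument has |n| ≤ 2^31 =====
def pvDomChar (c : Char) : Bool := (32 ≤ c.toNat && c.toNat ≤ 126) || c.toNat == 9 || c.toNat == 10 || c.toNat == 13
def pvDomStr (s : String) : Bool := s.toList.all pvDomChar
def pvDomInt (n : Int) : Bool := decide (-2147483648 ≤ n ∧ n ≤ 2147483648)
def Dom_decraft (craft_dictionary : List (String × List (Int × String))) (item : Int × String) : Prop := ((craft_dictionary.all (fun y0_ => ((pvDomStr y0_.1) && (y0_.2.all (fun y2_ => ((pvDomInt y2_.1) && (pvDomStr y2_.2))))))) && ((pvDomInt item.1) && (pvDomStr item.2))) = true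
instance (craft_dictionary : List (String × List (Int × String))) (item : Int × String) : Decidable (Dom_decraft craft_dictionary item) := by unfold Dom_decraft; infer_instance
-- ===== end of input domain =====

-- B replaces A's per-node build/merge/scale of intermediate dicts by one accumulator dict threaded
-- through the recursion with the multiplier pushed down (objective: alternative; return value only —
-- neither program mutates its arguments).

-- ===== PORT A =====
-- d[k] = d.get-first-match + v, appending a new key at the end (Python dict update in insertion order)
def pvUpd : List (String × Int) → String → Int → List (String × Int)
  | [], k, v => [(k, v)]
  | (k', v') :: t, k, v => if k' = k then (k', v' + v) :: t else (k', v') :: pvUpd t k v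

-- add_dictionary_vectors d1 d2: fold d1's entries into d2
def pvAdd (d1 d2 : List (String × Int)) : List (String × Int) :=
  d1.foldl (fun d p => pvUpd d p.1 p.2) d2

-- scale_dictionary_vectors: vector[val] *= scalar, in place (order kept)
def pvScale (c : Int) (d : List (String × Int)) : List (String × Int) :=
  d.map (fun p => (p.1, p.2 * c))

-- decraft with a fuel guard for totality only: fuel (length+1) bounds the depth of the
-- composite chain, which is ≤ #keys whenever A terminates (Pre_decraft)
def decraftF (fuel : Nat) (craft_dictionary : List (String × List (Int × String))) (item : Int × String) : List (String × Int) :=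
  match fuel with
  | 0 => []
  | fuel + 1 =>
    match craft_dictionary.lookup item.2 with
    | some things =>
        pvScale item.1 (things.foldl (fun acc thing => pvAdd (decraftF fuel craft_dictionary thing) acc) [])
    | none => [(item.2, item.1)]

def decraft (craft_dictionary : List (String × List (Int × String))) (item : Int × String) : List (String × Int) :=
  decraftF (craft_dictionary.length + 1) craft_dictionary item

-- ===== PORT B =====
-- walk: thread the single counts dict through the recursion, multiplying counts on the way down
def pvWalk (fuel : Nat) (craft_dictionary : List (String × List (Int × String))) (counts : List (String × Int)) (count : Int) (name : String) : List (String × Int) :=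
  match fuel with
  | 0 => counts
  | fuel + 1 =>
    match craft_dictionary.lookup name with
    | some things => things.foldl (fun counts p => pvWalk fuel craft_dictionary counts (count * p.1) p.2) counts
    | none => pvUpd counts name count

def decraft_alt (craft_dictionary : List (String × List (Int × String))) (item : Int × String) : List (String × Int) :=
  pvWalk (craft_dictionary.length + 1) craft_dictionary [] item.1 item.2

-- ===== PRECONDITION & SPEC =====
-- successors of a name in the recipe graph
def pvSuccs (craft_dictionary : List (String × List (Int × String))) (n : String) : List String :=
  ((craft_dictionary.lookup n).getD []).map (·.2)

-- one closure step: add every successor of every member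
def pvGrow (craft_dictionary : List (String × List (Int × String))) (S : List String) : List String :=
  S.foldl (fun acc k => (pvSuccs craft_dictionary k).foldl (fun a m => if m ∈ a then a else a ++ [m]) acc) S

-- names reachable from S0 (closure reached after ≤ #keys+1 steps)
def pvReach (craft_dictionary : List (String × List (Int × String))) (S0 : List String) : List String :=
  (pvGrow craft_dictionary)^[craft_dictionary.length + 2] S0

-- Pre_ excludes exactly the inputs whose recipe graph has a cycle reachable from the item:
-- there Python A (and B) recurse forever (RecursionError).
def Pre_decraft (craft_dictionary : List (String × List (Int × String))) (item : Int × String) : Prop :=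
  ((pvReach craft_dictionary [item.2]).all
    (fun k => !(decide (k ∈ pvReach craft_dictionary (pvSuccs craft_dictionary k))))) = true
instance (craft_dictionary : List (String × List (Int × String))) (item : Int × String) : Decidable (Pre_decraft craft_dictionary item) := by unfold Pre_decraft; infer_instance

def pvWitness_decraft : (List (String × List (Int × String))) × (Int × String) :=
  ([("sword", [(2, "wood"), (1, "iron")]), ("iron", [(3, "ore")])], (3, "sword"))

def Spec_decraft (craft_dictionary : List (String × List (Int × String))) (item : Int × String) (out : List (String × Int)) : Prop := out = decraft_alt craft_dictionary item
instance (craft_dictionary : List (String × List (Int × String))) (item : Int × String) (out : List (String × Int)) : Decidable (Spec_decraft craft_dictionary item out) := by unfold Spec_decraft; infer_instance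

-- ===== CLAIM (what is proved, stated in full; the proofs are below) =====
def Claim_equal_decraft : Prop := ∀ (craft_dictionary : List (String × List (Int × String))) (item : Int × String), Dom_decraft craft_dictionary item → Pre_decraft craft_dictionary item → Spec_decraft craft_dictionary item (decraft craft_dictionary item)

-- ===== LEMMAS AND PROOFS =====

def pvKeys (d : List (String × Int)) : List String := d.map Prod.fst

theorem mem_keys_upd {d : List (String × Int)} {k k1 : String} {v1 : Int}
    (h : k ∈ pvKeys d) : k ∈ pvKeys (pvUpd d k1 v1) := by
  induction d with
  | nil => simp [pvKeys] at h
  | cons p t ih =>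
    obtain ⟨a, w⟩ := p
    simp only [pvUpd]
    split_ifs with hk
    · simpa [pvKeys] using h
    · simp only [pvKeys, List.map_cons, List.mem_cons] at h ⊢
      rcases h with h | h
      · exact Or.inl h
      · exact Or.inr (ih h)

theorem upd_upd_comm {acc : List (String × Int)} {k k1 : String} {v v1 : Int}
    (h : k ∈ pvKeys acc) :
    pvUpd (pvUpd acc k1 v1) k v = pvUpd (pvUpd acc k v) k1 v1 := by
  induction acc with
  | nil => simp [pvKeys] at h
  | cons p t ih =>
    obtain ⟨a, w⟩ := p
    by_cases h1 : a = k1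
    · by_cases h2 : a = k
      · simp [pvUpd, h1, ← h1.symm.trans h2]; ring
      · have hne : ¬k1 = k := fun hh => h2 (h1.trans hh)
        simp [pvUpd, h1, hne]
    · by_cases h2 : a = k
      · have hne : ¬k = k1 := fun hh => h1 (h2.trans hh)
        simp [pvUpd, h2, hne]
      · have hk : k ∈ pvKeys t := by
          rcases (by simpa [pvKeys] using h : k = a ∨ k ∈ pvKeys t) with hh | hh
          · exact absurd hh.symm h2
          · exact hh
        simp [pvUpd, h1, h2, ih hk]

theorem upd_upd_same (acc : List (String × Int)) (k : String) (a b : Int) :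
    pvUpd (pvUpd acc k a) k b = pvUpd acc k (a + b) := by
  induction acc with
  | nil => simp [pvUpd]
  | cons p t ih =>
    obtain ⟨a', w⟩ := p
    by_cases h : a' = k
    · simp [pvUpd, h]; ring
    · simp [pvUpd, h, ih]

theorem add_upd_comm {X acc : List (String × Int)} {k : String} {v : Int}
    (h : k ∈ pvKeys acc) :
    pvUpd (pvAdd X acc) k v = pvAdd X (pvUpd acc k v) := by
  induction X generalizing acc with
  | nil => simp [pvAdd]
  | cons p X' ih =>
    obtain ⟨k1, v1⟩ := p
    show pvUpd (pvAdd X' (pvUpd acc k1 v1)) k v = pvAdd X' (pvUpd (pvUpd acc k v) k1 v1)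
    rw [ih (mem_keys_upd h), upd_upd_comm h]

theorem mem_keys_upd_self (acc : List (String × Int)) (k : String) (v : Int) :
    k ∈ pvKeys (pvUpd acc k v) := by
  induction acc with
  | nil => simp [pvUpd, pvKeys]
  | cons p t ih =>
    obtain ⟨a, w⟩ := p
    by_cases h : a = k <;> simp [pvUpd, h, pvKeys] at ih ⊢
    · exact Or.inr ih

theorem add_of_upd (B : List (String × Int)) (k : String) (v : Int) (acc : List (String × Int)) :
    pvAdd (pvUpd B k v) acc = pvUpd (pvAdd B acc) k v := by
  induction B generalizing acc with
  | nil => rfl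
  | cons p B' ih =>
    obtain ⟨k', v'⟩ := p
    by_cases h : k' = k
    · subst h
      calc pvAdd (pvUpd ((k', v') :: B') k' v) acc
          = pvAdd ((k', v' + v) :: B') acc := by simp [pvUpd]
        _ = pvAdd B' (pvUpd acc k' (v' + v)) := rfl
        _ = pvAdd B' (pvUpd (pvUpd acc k' v') k' v) := by rw [upd_upd_same]
        _ = pvUpd (pvAdd B' (pvUpd acc k' v')) k' v :=
            (add_upd_comm (mem_keys_upd_self acc k' v')).symm
        _ = pvUpd (pvAdd ((k', v') :: B') acc) k' v := rfl
    · calc pvAdd (pvUpd ((k', v') :: B') k v) acc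
          = pvAdd ((k', v') :: pvUpd B' k v) acc := by simp [pvUpd, h]
        _ = pvAdd (pvUpd B' k v) (pvUpd acc k' v') := rfl
        _ = pvUpd (pvAdd B' (pvUpd acc k' v')) k v := ih _
        _ = pvUpd (pvAdd ((k', v') :: B') acc) k v := rfl

theorem add_assoc' (A B acc : List (String × Int)) :
    pvAdd A (pvAdd B acc) = pvAdd (pvAdd A B) acc := by
  induction A generalizing B with
  | nil => simp [pvAdd]
  | cons p A' ih =>
    obtain ⟨k, v⟩ := p
    show pvAdd A' (pvUpd (pvAdd B acc) k v) = pvAdd (pvAdd A' (pvUpd B k v)) acc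
    rw [← add_of_upd B k v acc, ih (pvUpd B k v)]

theorem scale_upd (c : Int) (X : List (String × Int)) (k : String) (v : Int) :
    pvScale c (pvUpd X k v) = pvUpd (pvScale c X) k (v * c) := by
  induction X with
  | nil => simp [pvScale, pvUpd]
  | cons p t ih =>
    obtain ⟨a, w⟩ := p
    by_cases h : a = k <;> simp [pvScale, pvUpd, h] at ih ⊢
    · ring
    · exact ih

theorem scale_add (c : Int) (d X : List (String × Int)) :
    pvScale c (pvAdd d X) = pvAdd (pvScale c d) (pvScale c X) := by
  induction d generalizing X with
  | nil => rfl
  | cons p d' ih =>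
    obtain ⟨k, v⟩ := p
    show pvScale c (pvAdd d' (pvUpd X k v)) = pvAdd (pvScale c d') (pvUpd (pvScale c X) k (v * c))
    rw [ih (pvUpd X k v), scale_upd]

theorem decraftF_scale (f : Nat) (cd : List (String × List (Int × String))) (a b : Int) (n : String) :
    decraftF f cd (a * b, n) = pvScale a (decraftF f cd (b, n)) := by
  cases f with
  | zero => simp [decraftF, pvScale]
  | succ f =>
    simp only [decraftF]
    cases h : cd.lookup n with
    | none => simp [pvScale, mul_comm]
    | some things =>
      simp only [pvScale, List.map_map]
      congr 1
      funext p
      simp [mul_assoc, mul_comm b a]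

theorem fold_scale_key (c : Int) (g : Int × String → List (String × Int))
    (ds : List (Int × String)) (X acc : List (String × Int)) :
    ds.foldl (fun a p => pvAdd (pvScale c (g p)) a) (pvAdd (pvScale c X) acc)
      = pvAdd (pvScale c (ds.foldl (fun a p => pvAdd (g p) a) X)) acc := by
  induction ds generalizing X with
  | nil => simp
  | cons d ds' ih =>
    simp only [List.foldl_cons]
    rw [show pvAdd (pvScale c (g d)) (pvAdd (pvScale c X) acc)
          = pvAdd (pvScale c (pvAdd (g d) X)) acc by
        rw [scale_add, ← add_assoc'],
      ih (pvAdd (g d) X)]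

theorem walk_eq_add (f : Nat) (cd : List (String × List (Int × String)))
    (acc : List (String × Int)) (c : Int) (n : String) :
    pvWalk f cd acc c n = pvAdd (decraftF f cd (c, n)) acc := by
  induction f generalizing acc c n with
  | zero => simp [pvWalk, decraftF, pvAdd]
  | succ f ih =>
    simp only [pvWalk, decraftF]
    cases h : cd.lookup n with
    | none => simp [pvAdd]
    | some things =>
      have step : ∀ (a : List (String × Int)) (p : Int × String),
          pvWalk f cd a (c * p.1) p.2 = pvAdd (pvScale c (decraftF f cd p)) a := by
        intro a p
        obtain ⟨p1, p2⟩ := p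
        rw [ih, decraftF_scale]
      calc things.foldl (fun a p => pvWalk f cd a (c * p.1) p.2) acc
          = things.foldl (fun a p => pvAdd (pvScale c (decraftF f cd p)) a) acc := by
            apply PySem.List.foldl_congr_mem
            intro a p _
            exact step a p
        _ = things.foldl (fun a p => pvAdd (pvScale c (decraftF f cd p)) a)
              (pvAdd (pvScale c []) acc) := by simp [pvScale, pvAdd]
        _ = pvAdd (pvScale c (things.foldl (fun a p => pvAdd (decraftF f cd p) a) [])) acc :=
            fold_scale_key c (fun p => decraftF f cd p) things [] acc

theorem keys_upd_sub (d : List (String × Int)) (k : String) (v : Int) :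
    pvKeys (pvUpd d k v) = pvKeys d ∨ pvKeys (pvUpd d k v) = pvKeys d ++ [k] := by
  induction d with
  | nil => right; simp [pvUpd, pvKeys]
  | cons p t ih =>
    obtain ⟨a, w⟩ := p
    by_cases h : a = k
    · left; simp [pvUpd, h, pvKeys]
    · rcases ih with ih | ih
      · left; simp [pvUpd, h, pvKeys] at ih ⊢; exact ih
      · right; simp [pvUpd, h, pvKeys] at ih ⊢; exact ih

theorem not_mem_keys_upd {d : List (String × Int)} {k k1 : String} {v1 : Int}
    (h : k ∉ pvKeys d) (hne : k ≠ k1) : k ∉ pvKeys (pvUpd d k1 v1) := by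
  rcases keys_upd_sub d k1 v1 with he | he <;> rw [he] <;> simp_all

theorem nodup_keys_upd {d : List (String × Int)} (k : String) (v : Int)
    (h : (pvKeys d).Nodup) : (pvKeys (pvUpd d k v)).Nodup := by
  induction d with
  | nil => simp [pvUpd, pvKeys]
  | cons p t ih =>
    obtain ⟨a, w⟩ := p
    simp only [pvKeys, List.map_cons, List.nodup_cons] at h
    by_cases hk : a = k
    · simpa [pvUpd, hk, pvKeys] using h
    · simp only [pvUpd, if_neg hk, pvKeys, List.map_cons, List.nodup_cons]
      exact ⟨not_mem_keys_upd h.1 (by simp_all) , ih h.2⟩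

theorem nodup_keys_add {X acc : List (String × Int)}
    (h : (pvKeys acc).Nodup) : (pvKeys (pvAdd X acc)).Nodup := by
  induction X generalizing acc with
  | nil => simpa [pvAdd]
  | cons p X' ih =>
    obtain ⟨k, v⟩ := p
    exact ih (nodup_keys_upd k v h)

theorem nodup_keys_decraftF (f : Nat) (cd : List (String × List (Int × String)))
    (it : Int × String) : (pvKeys (decraftF f cd it)).Nodup := by
  cases f with
  | zero => simp [decraftF, pvKeys]
  | succ f =>
    simp only [decraftF]
    cases h : cd.lookup it.2 with
    | none => simp [pvKeys]
    | some things =>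
      have base : ∀ (ts : List (Int × String)) (acc : List (String × Int)),
          (pvKeys acc).Nodup →
          (pvKeys (ts.foldl (fun acc thing => pvAdd (decraftF f cd thing) acc) acc)).Nodup := by
        intro ts
        induction ts with
        | nil => intro acc h2; simpa using h2
        | cons t ts' ihts =>
          intro acc h2
          simp only [List.foldl_cons]
          exact ihts (pvAdd (decraftF f cd t) acc) (nodup_keys_add h2)
      have := base things [] (by simp [pvKeys])
      simpa [pvScale, pvKeys, List.map_map, Function.comp] using this

theorem add_cons_out {X : List (String × Int)} {k : String} {v : Int}
    (h : k ∉ pvKeys X) (acc : List (String × Int)) :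
    pvAdd X ((k, v) :: acc) = (k, v) :: pvAdd X acc := by
  induction X generalizing acc with
  | nil => simp [pvAdd]
  | cons p X' ih =>
    obtain ⟨k1, v1⟩ := p
    simp only [pvKeys, List.map_cons, List.mem_cons, not_or] at h
    show pvAdd X' (pvUpd ((k, v) :: acc) k1 v1) = (k, v) :: pvAdd X' (pvUpd acc k1 v1)
    rw [show pvUpd ((k, v) :: acc) k1 v1 = (k, v) :: pvUpd acc k1 v1 by
      simp [pvUpd, h.1]]
    exact ih (by simpa [pvKeys] using h.2) _

theorem add_nil_right {X : List (String × Int)} (h : (pvKeys X).Nodup) :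
    pvAdd X [] = X := by
  induction X with
  | nil => rfl
  | cons p X' ih =>
    obtain ⟨k, v⟩ := p
    simp only [pvKeys, List.map_cons, List.nodup_cons] at h
    show pvAdd X' (pvUpd [] k v) = (k, v) :: X'
    show pvAdd X' [(k, v)] = (k, v) :: X'
    rw [show ([(k, v)] : List (String × Int)) = (k, v) :: [] from rfl,
      add_cons_out h.1, ih h.2]

-- ===== VERDICT (by name: the statement is the Claim_ definition above) =====
theorem decraft_spec : Claim_equal_decraft := by
  intro cd item _ _
  unfold Spec_decraft decraft decraft_alt
  obtain ⟨c, n⟩ := item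
  rw [walk_eq_add, add_nil_right (nodup_keys_decraftF _ _ _)]
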